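-- pv_equiv track=rewrite | github.com/daniel-reich/ubiquitous-fiesta | wbhjXmdbPSxCSE5hW_15.py | sigilize
-- ===== SOURCE A (Python) =====
-- def sigilize(desire):
--   x = ''.join(desire.upper().split())
--   for v in 'AEIOU':
--     x = x.replace(v, '')
--   for c in x:
--     if x.count(c) > 1:
--       x = x[:x.index(c)] + x[x.index(c)+1:]
--   return x
-- ===== SOURCE B (Python) =====
-- def sigilize(desire):
--     s = ''.join(desire.upper().split())
--     s = ''.join(ch for ch in s if ch not in 'AEIOU')
--     last = {}
--     for i, ch in enumerate(s):
--         last[ch] = i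
--     return ''.join(ch for i, ch in enumerate(s) if last[ch] == i)
-- ===== Notes on version B (the rewrite author's own statement) =====
-- stated objective: faster
-- what changed: Replaces A's quadratic remove-first-duplicate loop (count/index/slice per character) with a single pass that records each character's last index in a dict and emits a character only at its last occurrence; vowels are dropped by one filter pass instead of five replace passes.
import Mathlib
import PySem

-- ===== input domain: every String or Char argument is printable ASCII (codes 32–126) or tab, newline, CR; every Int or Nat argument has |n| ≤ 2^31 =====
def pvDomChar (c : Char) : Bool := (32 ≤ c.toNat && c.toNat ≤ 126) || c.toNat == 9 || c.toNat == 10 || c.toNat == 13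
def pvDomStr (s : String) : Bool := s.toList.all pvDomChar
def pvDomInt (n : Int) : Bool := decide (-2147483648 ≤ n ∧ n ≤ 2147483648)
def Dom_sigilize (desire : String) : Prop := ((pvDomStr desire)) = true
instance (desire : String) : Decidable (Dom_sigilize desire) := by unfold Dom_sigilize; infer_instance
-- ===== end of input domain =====

-- B replaces A's quadratic remove-first-duplicate loop with one linear pass keeping each
-- character's last occurrence (last-index dict); same return value, return-value equivalence only.

-- ===== PORT A =====
-- one iteration of A's loop body: 'if x.count(c) > 1: x = x[:x.index(c)] + x[x.index(c)+1:]'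
-- (x.index(c) is Str.find here: under count > 1 the character occurs, so find = index and no ValueError)
def sigilizeStep (x : String) (c : Char) : String :=
  if 1 < PySem.Str.count x (String.ofList [c]) then
    PySem.Str.slice x none (some (PySem.Str.find x (String.ofList [c]))) ++
      PySem.Str.slice x (some (PySem.Str.find x (String.ofList [c]) + 1)) none
  else x

def sigilize (desire : String) : String :=
  -- x = ''.join(desire.upper().split())
  let x0 := PySem.Str.join "" (PySem.Str.split₀ (PySem.Str.upper desire))
  -- for v in 'AEIOU': x = x.replace(v, '')
  let x1 := ['A','E','I','O','U'].foldl (fun x v => PySem.Str.replace x (String.ofList [v]) "") x0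
  -- for c in x: …   (Python iterates over the string bound at loop entry while x is reassigned)
  x1.toList.foldl sigilizeStep x1

-- ===== PORT B =====
def sigilize_alt (desire : String) : String :=
  let s := PySem.Str.join "" (PySem.Str.split₀ (PySem.Str.upper desire))
  -- s = ''.join(ch for ch in s if ch not in 'AEIOU')
  let cs := s.toList.filter (fun ch => !PySem.Chars.isIn [ch] ['A','E','I','O','U'])
  -- last = {}; for i, ch in enumerate(s): last[ch] = i
  let last := (PySem.List.enumerate cs).foldl (fun d p => d.insert p.2 p.1)
      (PySem.Dict.empty : PySem.Dict Char Int)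
  -- ''.join(ch for i, ch in enumerate(s) if last[ch] == i)   (last[ch] never raises: ch ∈ s)
  String.ofList (((PySem.List.enumerate cs).filter (fun p => last.getD p.2 (-1) == p.1)).map (fun p => p.2))

-- ===== PRECONDITION & SPEC =====
def Spec_sigilize (desire : String) (out : String) : Prop := out = sigilize_alt desire
instance (desire : String) (out : String) : Decidable (Spec_sigilize desire out) := by unfold Spec_sigilize; infer_instance

-- ===== CLAIM (what is proved, stated in full; the proofs are below) =====
def Claim_equal_sigilize : Prop := ∀ (desire : String), Dom_sigilize desire → Spec_sigilize desire (sigilize desire)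

-- ===== LEMMAS AND PROOFS =====

-- keep each character only at its last occurrence (the common semantics of both dedup loops)
def dedupLast : List Char → List Char
  | [] => []
  | a :: t => if a ∈ t then dedupLast t else a :: dedupLast t

-- ---- A side: x.replace(v, '') for a single character is a filter ----
theorem replace_go_singleton (v : Char) : ∀ (l acc : List Char) (fuel : Nat), l.length ≤ fuel →
    PySem.Chars.replace.go [v] [] fuel l acc = acc.reverse ++ l.filter (fun c => c ≠ v) := by
  intro l
  induction l with
  | nil => intro acc fuel _; cases fuel <;> simp [PySem.Chars.replace.go]
  | cons c t ih =>
    intro acc fuel hf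
    cases fuel with
    | zero => simp at hf
    | succ fuel =>
      simp only [PySem.Chars.replace.go]
      by_cases hcv : c = v
      · subst hcv
        simp only [List.isPrefixOf, BEq.rfl, Bool.true_and, if_pos]
        rw [show List.drop [c].length (c :: t) = t by simp]
        rw [ih _ fuel (by simpa using hf)]
        simp
      · have : ([v].isPrefixOf (c :: t)) = false := by
          simp [List.isPrefixOf]; exact fun h => hcv h.symm
        rw [if_neg (by simp [this])]
        rw [ih _ fuel (by simpa using hf)]
        simp [hcv]

theorem replace_singleton (cs : List Char) (v : Char) :
    PySem.Chars.replace cs [v] [] = cs.filter (fun c => c ≠ v) := by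
  rw [PySem.Chars.replace]
  rw [if_neg (by simp)]
  exact replace_go_singleton v cs [] cs.length le_rfl

-- ---- A side: x.count(c) for a single character is the character count ----
theorem count_go_singleton (c : Char) : ∀ (l : List Char) (acc fuel : Nat), l.length ≤ fuel →
    PySem.Chars.count.go [c] fuel l acc = acc + l.count c := by
  intro l
  induction l with
  | nil => intro acc fuel _; cases fuel <;> simp [PySem.Chars.count.go]
  | cons a t ih =>
    intro acc fuel hf
    cases fuel with
    | zero => simp at hf
    | succ fuel =>
      simp only [PySem.Chars.count.go]
      by_cases hca : c = a
      · subst hca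
        simp only [List.isPrefixOf, BEq.rfl, Bool.true_and, if_pos]
        rw [show List.drop [c].length (c :: t) = t by simp]
        rw [ih _ fuel (by simpa using hf)]
        simp
        omega
      · have : ([c].isPrefixOf (a :: t)) = false := by
          simp [List.isPrefixOf]; exact hca
        rw [if_neg (by simp [this])]
        rw [ih _ fuel (by simpa using hf)]
        simp [List.count_cons]
        intro h; exact absurd h.symm hca

theorem count_singleton (xs : List Char) (c : Char) :
    PySem.Chars.count xs [c] = xs.count c := by
  rw [PySem.Chars.count]
  rw [if_neg (by simp)]
  rw [count_go_singleton c xs 0 xs.length le_rfl]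
  omega

-- ---- A side: x.index(c) when the first occurrence of c sits right after prefix k ----
theorem find_singleton_append (k s' : List Char) (c : Char) (hc : c ∉ k) :
    PySem.Chars.find (k ++ c :: s') [c] = (k.length : Int) := by
  have hmem : [c] <:+: (k ++ c :: s') := ⟨k, s', by simp⟩
  have h0 : 0 ≤ PySem.Chars.find (k ++ c :: s') [c] := by
    rw [PySem.Chars.find_nonneg_iff]; exact hmem
  obtain ⟨hpre, hmin⟩ := PySem.Chars.find_spec (s := k ++ c :: s') (sub := [c]) h0
  set m := (PySem.Chars.find (k ++ c :: s') [c]).toNat with hm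
  have hle : m ≤ k.length := by
    by_contra hlt
    exact hmin k.length (by omega) ⟨s', by simp⟩
  have hme : m = k.length := by
    rcases Nat.lt_or_ge m k.length with hlt | hge
    · exfalso
      rcases hpre with ⟨t, ht⟩
      have hdrop : (k ++ c :: s').drop m = k.drop m ++ c :: s' := by
        rw [List.drop_append_of_le_length (by omega)]
      rw [hdrop] at ht
      have hk : k.drop m ≠ [] := by
        intro h; have := List.drop_eq_nil_iff.mp h; omega
      obtain ⟨a, rest, hrest⟩ := List.exists_cons_of_ne_nil hk
      rw [hrest] at ht
      have : a = c := by
        have := congrArg (List.head? ·) ht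
        simpa using this.symm
      subst this
      have : a ∈ k := by
        have : a ∈ k.drop m := by rw [hrest]; exact List.mem_cons_self
        exact List.mem_of_mem_drop this
      exact hc this
    · omega
  omega

-- list-level mirror of sigilizeStep
def stepL (xs : List Char) (c : Char) : List Char :=
  if 1 < PySem.Chars.count xs [c] then
    PySem.List.slice xs none (some (PySem.Chars.find xs [c])) ++
      PySem.List.slice xs (some (PySem.Chars.find xs [c] + 1)) none
  else xs

theorem toList_sigilizeStep (x : String) (c : Char) :
    (sigilizeStep x c).toList = stepL x.toList c := by
  by_cases h : 1 < PySem.Chars.count x.toList [c]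
  · simp [sigilizeStep, stepL, PySem.Str.count_eq, PySem.Str.find_eq, h,
      String.toList_append, PySem.Str.toList_slice]
  · simp [sigilizeStep, stepL, PySem.Str.count_eq, h]

-- the whole duplicate-removal loop keeps exactly the last occurrences
theorem foldl_stepL (s : List Char) : ∀ k : List Char, (∀ d ∈ k, d ∉ s) →
    s.foldl stepL (k ++ s) = k ++ dedupLast s := by
  induction s with
  | nil => intro k _; simp [dedupLast]
  | cons c s' ih =>
    intro k hk
    have hck : c ∉ k := fun h => hk c h (List.mem_cons_self)
    have hcount : PySem.Chars.count (k ++ c :: s') [c] = 1 + s'.count c := by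
      rw [count_singleton]
      simp [List.count_append, List.count_eq_zero.mpr hck]
      omega
    have hfind : PySem.Chars.find (k ++ c :: s') [c] = (k.length : Int) :=
      find_singleton_append k s' c hck
    simp only [List.foldl_cons]
    by_cases hmem : c ∈ s'
    · have hgt : 1 < PySem.Chars.count (k ++ c :: s') [c] := by
        rw [hcount]
        have : 0 < s'.count c := List.count_pos_iff.mpr hmem
        omega
      have hstep : stepL (k ++ c :: s') c = k ++ s' := by
        rw [stepL, if_pos hgt, hfind]
        rw [PySem.List.slice_to _ (by positivity)]
        rw [show (k.length : Int) + 1 = ((k.length + 1 : Nat) : Int) by push_cast; ring]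
        rw [PySem.List.slice_from _ (by positivity)]
        simp only [Int.toNat_natCast]
        rw [List.take_left]
        rw [show k ++ c :: s' = (k ++ [c]) ++ s' by simp]
        rw [show k.length + 1 = (k ++ [c]).length by simp]
        rw [List.drop_left]
      rw [hstep, ih k (fun d hd => fun hds => hk d hd (List.mem_cons_of_mem _ hds))]
      simp [dedupLast, hmem]
    · have hng : ¬ 1 < PySem.Chars.count (k ++ c :: s') [c] := by
        rw [hcount, List.count_eq_zero.mpr hmem]
        omega
      have hstep : stepL (k ++ c :: s') c = k ++ c :: s' := by
        rw [stepL, if_neg hng]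
      rw [hstep]
      rw [show k ++ c :: s' = (k ++ [c]) ++ s' by simp]
      rw [ih (k ++ [c]) ?_]
      · simp [dedupLast, hmem]
      · intro d hd
        rcases List.mem_append.mp hd with h | h
        · exact fun hds => hk d h (List.mem_cons_of_mem _ hds)
        · simp at h; subst h; exact hmem

-- ---- B side ----
-- index of the last occurrence (meaningful only under membership)
def lastIdxN : List Char → Char → Nat
  | [], _ => 0
  | _ :: t, ch => if ch ∈ t then lastIdxN t ch + 1 else 0

theorem getD_fold (cs : List Char) : ∀ (n : Int) (d : PySem.Dict Char Int) (ch : Char),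
    ((PySem.List.enumerate cs n).foldl (fun d p => d.insert p.2 p.1) d).getD ch (-1)
      = if ch ∈ cs then n + lastIdxN cs ch else d.getD ch (-1) := by
  induction cs with
  | nil => intro n d ch; simp [PySem.List.enumerate]
  | cons a t ih =>
    intro n d ch
    rw [PySem.List.enumerate_cons]
    simp only [List.foldl_cons]
    rw [ih]
    by_cases hmem : ch ∈ t
    · simp only [hmem, if_pos, lastIdxN, List.mem_cons, or_true]
      push_cast; ring
    · rw [if_neg hmem]
      rw [PySem.Dict.getD_insert]
      by_cases hca : ch = a
      · subst hca
        simp [lastIdxN, hmem]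
      · simp [hmem, hca]

theorem filt_main (cs : List Char) : ∀ (n : Int) (D : PySem.Dict Char Int),
    (∀ ch ∈ cs, D.getD ch (-1) = n + lastIdxN cs ch) →
    (((PySem.List.enumerate cs n).filter (fun p => D.getD p.2 (-1) == p.1)).map (fun p => p.2))
      = dedupLast cs := by
  induction cs with
  | nil => intro n D _; simp [PySem.List.enumerate, dedupLast]
  | cons a t ih =>
    intro n D h
    rw [PySem.List.enumerate_cons]
    have ht : ∀ ch ∈ t, D.getD ch (-1) = (n + 1) + lastIdxN t ch := by
      intro ch hch
      rw [h ch (List.mem_cons_of_mem _ hch)]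
      simp [lastIdxN, hch]
      ring
    have ha : D.getD a (-1) = n + lastIdxN (a :: t) a := h a List.mem_cons_self
    by_cases hmem : a ∈ t
    · have : (D.getD a (-1) == n) = false := by
        rw [ha]
        simp only [lastIdxN, hmem, if_pos, beq_eq_false_iff_ne, ne_eq]
        intro he; omega
      simp only [List.filter_cons, this, if_neg, Bool.false_eq_true, not_false_iff]
      rw [ih (n + 1) D ht]
      simp [dedupLast, hmem]
    · have : (D.getD a (-1) == n) = true := by
        rw [ha]; simp [lastIdxN, hmem]
      simp only [List.filter_cons, this, if_pos, List.map_cons]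
      rw [ih (n + 1) D ht]
      simp [dedupLast, hmem]

-- ---- vowel stripping: five single-character replaces = one filter ----
theorem isIn_singleton (ch : Char) (l : List Char) :
    PySem.Chars.isIn [ch] l = decide (ch ∈ l) := by
  by_cases h : ch ∈ l
  · simp [h]
    rw [PySem.Chars.isIn_iff_infix]
    exact (List.singleton_infix_iff ch l).mpr h
  · simp [h]
    rw [PySem.Chars.isIn_eq_false_iff]
    rw [List.singleton_infix_iff]
    exact h

theorem vowels_eq (t : List Char) :
    (['A','E','I','O','U'].foldl (fun x v => PySem.Chars.replace x [v] []) t)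
      = t.filter (fun ch => !PySem.Chars.isIn [ch] ['A','E','I','O','U']) := by
  simp only [List.foldl_cons, List.foldl_nil, replace_singleton, List.filter_filter]
  apply List.filter_congr
  intro ch _
  rw [isIn_singleton]
  by_cases h : ch ∈ (['A','E','I','O','U'] : List Char)
  · simp only [h, decide_true, Bool.not_true]
    simp at h
    rcases h with h | h | h | h | h <;> subst h <;> decide
  · simp only [h, decide_false, Bool.not_false]
    simp at h
    obtain ⟨h1, h2, h3, h4, h5⟩ := h
    simp [h1, h2, h3, h4, h5]

-- ---- assembly ----
theorem sigilize_toList (desire : String) :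
    (sigilize desire).toList =
      dedupLast ((PySem.Str.join "" (PySem.Str.split₀ (PySem.Str.upper desire))).toList.filter
        (fun ch => !PySem.Chars.isIn [ch] ['A','E','I','O','U'])) := by
  rw [sigilize]
  set x0 := PySem.Str.join "" (PySem.Str.split₀ (PySem.Str.upper desire)) with hx0
  set x1 := ['A','E','I','O','U'].foldl (fun x v => PySem.Str.replace x (String.ofList [v]) "") x0 with hx1
  have hx1l : x1.toList = x0.toList.filter (fun ch => !PySem.Chars.isIn [ch] ['A','E','I','O','U']) := by
    rw [hx1, ← vowels_eq]
    rw [← List.foldl_hom String.toList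
      (g₁ := fun x v => PySem.Str.replace x (String.ofList [v]) "")
      (g₂ := fun x v => PySem.Chars.replace x [v] [])
      (fun x v => by simp [PySem.Str.toList_replace, String.toList_ofList])]
  have hfold : (x1.toList.foldl sigilizeStep x1).toList = x1.toList.foldl stepL x1.toList := by
    rw [List.foldl_hom String.toList (g₁ := sigilizeStep) (g₂ := stepL)
      (fun x c => (toList_sigilizeStep x c).symm)]
  rw [hfold]
  have := foldl_stepL x1.toList [] (by simp)
  simpa [hx1l] using this

theorem sigilize_alt_toList (desire : String) :
    (sigilize_alt desire).toList =
      dedupLast ((PySem.Str.join "" (PySem.Str.split₀ (PySem.Str.upper desire))).toList.filter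
        (fun ch => !PySem.Chars.isIn [ch] ['A','E','I','O','U'])) := by
  simp only [sigilize_alt, String.toList_ofList]
  exact filt_main _ 0 _ (fun ch hch => by rw [getD_fold, if_pos hch])

-- ===== VERDICT (by name: the statement is the Claim_ definition above) =====
theorem sigilize_spec : Claim_equal_sigilize := by
  intro desire _
  unfold Spec_sigilize
  apply String.toList_inj.mp
  rw [sigilize_toList, sigilize_alt_toList]
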